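-- pv_equiv track=rewrite | github.com/bbugyi200/dotfiles | home/lib/gai/src/commit_workflow/changespec_operations.py | _find_changespec_end_line
-- ===== SOURCE A (Python) =====
-- def _find_changespec_end_line(lines: list[str], changespec_name: str) -> int | None:
--     """Find the line number where a ChangeSpec ends.
--
--     A ChangeSpec ends at the last non-empty line before either:
--     - The next NAME: field
--     - The end of the file
--
--     Args:
--         lines: List of lines from the project file.
--         changespec_name: NAME of the ChangeSpec to find.
--
--     Returns:
--         The line index (0-based) of the last line of the ChangeSpec,
--         or None if the ChangeSpec is not found.
--     """
--     in_target_changespec = False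
--     changespec_end = None
--
--     for i, line in enumerate(lines):
--         if line.startswith("NAME: "):
--             if in_target_changespec:
--                 # We hit the next ChangeSpec, so the previous one ended
--                 # Find the last non-empty line before this
--                 for j in range(i - 1, -1, -1):
--                     if lines[j].strip():
--                         return j
--                 return i - 1
--
--             # Check if this is the target ChangeSpec
--             current_name = line[6:].strip()
--             if current_name == changespec_name:
--                 in_target_changespec = True
--                 changespec_end = i
--
--         elif in_target_changespec and line.strip():
--             # Track the last non-empty line in the target ChangeSpec
--             changespec_end = i
--
--     # If we're still in the target ChangeSpec at the end of file
--     if in_target_changespec: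
--         return changespec_end
--
--     return None
-- ===== SOURCE B (Python) =====
-- def _find_changespec_end_line(lines: list[str], changespec_name: str) -> int | None:
--     """Three linear passes: find the target NAME line, find the next NAME line
--     (or EOF), then scan backward for the last non-empty line before it."""
--     start = None
--     for i, line in enumerate(lines):
--         if line.startswith("NAME: ") and line[6:].strip() == changespec_name:
--             start = i
--             break
--     if start is None:
--         return None
--     end_bound = len(lines)
--     for i in range(start + 1, len(lines)):
--         if lines[i].startswith("NAME: "):
--             end_bound = i
--             break
--     for j in range(end_bound - 1, -1, -1):
--         if lines[j].strip():
--             return j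
--     return None
-- ===== Notes on version B (the rewrite author's own statement) =====
-- stated objective: simpler
-- what changed: Replaced A's single stateful scan (in_target flag, tracked changespec_end, nested backward loop inside the forward loop) by three independent linear passes: find the target NAME line, find the next NAME line (or EOF), then one backward scan for the last non-empty line before that bound.
import Mathlib
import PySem

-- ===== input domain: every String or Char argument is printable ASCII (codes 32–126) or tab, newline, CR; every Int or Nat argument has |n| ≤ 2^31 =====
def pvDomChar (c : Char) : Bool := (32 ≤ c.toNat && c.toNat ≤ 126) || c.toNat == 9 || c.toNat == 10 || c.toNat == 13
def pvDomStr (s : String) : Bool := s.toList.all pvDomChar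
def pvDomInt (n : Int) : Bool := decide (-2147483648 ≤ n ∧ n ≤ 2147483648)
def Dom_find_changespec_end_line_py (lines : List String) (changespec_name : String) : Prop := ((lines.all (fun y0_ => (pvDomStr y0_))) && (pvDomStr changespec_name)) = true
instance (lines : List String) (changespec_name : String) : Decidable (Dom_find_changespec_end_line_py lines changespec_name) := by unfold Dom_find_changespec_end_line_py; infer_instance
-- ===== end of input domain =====

-- B re-decomposes A's single stateful scan into three independent linear passes
-- (find the NAME line, find the next NAME line, scan backward for the last
-- non-empty line); objective: simpler. Same return value everywhere; no mutation.

-- ===== PORT A =====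
-- inner loop 'for j in range(i - 1, -1, -1): if lines[j].strip(): return j' then 'return i - 1';
-- the Nat argument n means the next tested index is n - 1 (so the call for i starts at n = i)
def pvABack (lines : List String) (fallback : Int) : Nat → Int
  | 0 => fallback
  | j + 1 => if PySem.Str.strip (lines.getD j "") ≠ "" then (j : Int) else pvABack lines fallback j

-- the 'for i, line in enumerate(lines)' loop with state (in_target_changespec, changespec_end)
def pvALoop (lines : List String) (changespec_name : String) :
    List String → Nat → Bool → Option Int → Option Int
  | [], _, inT, ce => if inT then ce else none
  | line :: rest, i, inT, ce =>
    if PySem.Str.startswith line "NAME: " then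
      if inT then some (pvABack lines ((i : Int) - 1) i)
      else if PySem.Str.strip (PySem.Str.slice line (some 6) none) = changespec_name then
        pvALoop lines changespec_name rest (i + 1) true (some (i : Int))
      else
        pvALoop lines changespec_name rest (i + 1) inT ce
    else if inT = true ∧ PySem.Str.strip line ≠ "" then
      pvALoop lines changespec_name rest (i + 1) inT (some (i : Int))
    else
      pvALoop lines changespec_name rest (i + 1) inT ce

def find_changespec_end_line_py (lines : List String) (changespec_name : String) : Option Int :=
  pvALoop lines changespec_name lines 0 false none

-- ===== PORT B =====
-- pass 1: first index whose line starts with "NAME: " and names the target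
def pvBStart (changespec_name : String) : List String → Nat → Option Nat
  | [], _ => none
  | line :: rest, i =>
    if PySem.Str.startswith line "NAME: " = true ∧
        PySem.Str.strip (PySem.Str.slice line (some 6) none) = changespec_name then
      some i
    else pvBStart changespec_name rest (i + 1)

-- pass 2: index of the next "NAME: " line (scanning the dropped suffix), or len(lines)
def pvBBound : List String → Nat → Nat
  | [], i => i
  | line :: rest, i => if PySem.Str.startswith line "NAME: " then i else pvBBound rest (i + 1)

-- pass 3: 'for j in range(end_bound - 1, -1, -1)'; the Nat argument n means next tested index is n - 1
def pvBBack (lines : List String) : Nat → Option Int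
  | 0 => none
  | j + 1 => if PySem.Str.strip (lines.getD j "") ≠ "" then some ((j : Nat) : Int) else pvBBack lines j

def find_changespec_end_line_py_alt (lines : List String) (changespec_name : String) : Option Int :=
  match pvBStart changespec_name lines 0 with
  | none => none
  | some s => pvBBack lines (pvBBound (lines.drop (s + 1)) (s + 1))

-- ===== PRECONDITION & SPEC =====
def Spec_find_changespec_end_line_py (lines : List String) (changespec_name : String) (out : Option Int) : Prop := out = find_changespec_end_line_py_alt lines changespec_name
instance (lines : List String) (changespec_name : String) (out : Option Int) : Decidable (Spec_find_changespec_end_line_py lines changespec_name out) := by unfold Spec_find_changespec_end_line_py; infer_instance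

-- ===== CLAIM (what is proved, stated in full; the proofs are below) =====
def Claim_equal_find_changespec_end_line_py : Prop := ∀ (lines : List String) (changespec_name : String), Dom_find_changespec_end_line_py lines changespec_name → Spec_find_changespec_end_line_py lines changespec_name (find_changespec_end_line_py lines changespec_name)

-- ===== LEMMAS AND PROOFS =====

-- a line that starts with "NAME: " strips to a non-empty string
lemma pv_strip_ne_of_name (l : String) (h : PySem.Str.startswith l "NAME: " = true) :
    PySem.Str.strip l ≠ "" := by
  intro hs
  have h1 : PySem.Chars.startswith l.toList "NAME: ".toList = true := by
    rw [← PySem.Str.startswith_eq]; exact h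
  obtain ⟨t, ht⟩ := (PySem.Chars.startswith_iff _ _).mp h1
  have hlist : l.toList = 'N' :: ('A' :: 'M' :: 'E' :: ':' :: ' ' :: t) := by
    rw [← ht]; rfl
  have h2 : PySem.Chars.strip l.toList = [] := by
    rw [← PySem.Str.toList_strip, hs]; rfl
  unfold PySem.Chars.strip PySem.Chars.lstrip PySem.Chars.rstrip at h2
  rw [hlist, List.dropWhile_cons_of_neg (by decide)] at h2
  rw [List.reverse_eq_nil_iff, List.dropWhile_eq_nil_iff] at h2
  exact absurd (h2 'N' (by simp)) (by decide)

-- the head and tail of lines.drop i, when it is a cons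
lemma pv_drop_getD (lines : List String) (i : Nat) (line : String) (rest : List String)
    (h : lines.drop i = line :: rest) : lines.getD i "" = line := by
  have h0 : (lines.drop i)[0]? = some line := by rw [h]; rfl
  rw [List.getElem?_drop] at h0
  simp only [Nat.add_zero] at h0
  simp [List.getD_eq_getElem?_getD, h0]

lemma pv_drop_succ (lines : List String) (i : Nat) (line : String) (rest : List String)
    (h : lines.drop i = line :: rest) : lines.drop (i + 1) = rest := by
  have h1 : lines.drop (i + 1) = (lines.drop i).drop 1 := by rw [List.drop_drop]
  rw [h1, h]; rfl

-- pvBBack finds exactly the largest non-empty index below n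
lemma pvBBack_eq (lines : List String) (ce n : Nat) (hlt : ce < n)
    (hne : PySem.Str.strip (lines.getD ce "") ≠ "")
    (hemp : ∀ j, ce < j → j < n → PySem.Str.strip (lines.getD j "") = "") :
    pvBBack lines n = some ((ce : Nat) : Int) := by
  induction n with
  | zero => omega
  | succ m ih =>
    by_cases hc : ce = m
    · subst hc
      simp only [pvBBack]
      rw [if_pos hne]
    · have hm : PySem.Str.strip (lines.getD m "") = "" := hemp m (by omega) (by omega)
      simp only [pvBBack, hm, ne_eq, not_true_eq_false, if_false]
      exact ih (by omega) (fun j hj1 hj2 => hemp j hj1 (by omega))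

-- pvABack agrees with pvBBack whenever the latter returns a value
lemma pvABack_eq (lines : List String) (fb : Int) (n : Nat) (k : Int)
    (h : pvBBack lines n = some k) : pvABack lines fb n = k := by
  induction n with
  | zero => simp [pvBBack] at h
  | succ m ih =>
    by_cases hc : PySem.Str.strip (lines.getD m "") = ""
    · simp only [pvBBack, pvABack, hc, ne_eq, not_true_eq_false, if_false] at h ⊢
      exact ih h
    · simp only [pvBBack, pvABack, hc, ne_eq, not_false_eq_true, if_true] at h ⊢
      exact (Option.some_inj.mp h).symm ▸ rfl

-- the in-target phase of A computes B's backward scan from B's bound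
lemma pvPhase2 (lines : List String) (changespec_name : String) :
    ∀ (rest : List String) (i ce : Nat), lines.drop i = rest → ce < i →
      PySem.Str.strip (lines.getD ce "") ≠ "" →
      (∀ j, ce < j → j < i → PySem.Str.strip (lines.getD j "") = "") →
      pvALoop lines changespec_name rest i true (some ((ce : Nat) : Int)) =
        pvBBack lines (pvBBound rest i) := by
  intro rest
  induction rest with
  | nil =>
    intro i ce hdrop hlt hne hemp
    simp only [pvALoop, pvBBound, if_true]
    exact (pvBBack_eq lines ce i hlt hne hemp).symm
  | cons line rest ih =>
    intro i ce hdrop hlt hne hemp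
    have hget : lines.getD i "" = line := pv_drop_getD lines i line rest hdrop
    have hdrop' : lines.drop (i + 1) = rest := pv_drop_succ lines i line rest hdrop
    by_cases hname : PySem.Str.startswith line "NAME: " = true
    · have hb := pvBBack_eq lines ce i hlt hne hemp
      simp only [pvALoop, pvBBound, hname, if_true]
      rw [hb, pvABack_eq lines ((i : Int) - 1) i ((ce : Nat) : Int) hb]
    · by_cases hch : PySem.Str.strip line = ""
      · simp only [pvALoop, pvBBound, hname, hch, ne_eq, not_true_eq_false, and_false,
          if_false, Bool.false_eq_true]
        exact ih (i + 1) ce hdrop' (by omega) hne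
          (fun j hj1 hj2 => by
            by_cases hji : j = i
            · subst hji; rw [hget]; exact hch
            · exact hemp j hj1 (by omega))
      · simp only [pvALoop, pvBBound, hname, hch, ne_eq, not_false_eq_true,
          and_true, if_true, Bool.false_eq_true, if_false]
        exact ih (i + 1) i hdrop' (by omega) (by rw [hget]; exact hch)
          (fun j hj1 hj2 => by omega)

-- the searching phase of A matches B's first pass, then hands over to pvPhase2
lemma pvPhase1 (lines : List String) (changespec_name : String) :
    ∀ (rest : List String) (i : Nat), lines.drop i = rest →
      pvALoop lines changespec_name rest i false none =
        (match pvBStart changespec_name rest i with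
          | none => none
          | some s => pvBBack lines (pvBBound (lines.drop (s + 1)) (s + 1))) := by
  intro rest
  induction rest with
  | nil => intro i _; simp [pvALoop, pvBStart]
  | cons line rest ih =>
    intro i hdrop
    have hget : lines.getD i "" = line := pv_drop_getD lines i line rest hdrop
    have hdrop' : lines.drop (i + 1) = rest := pv_drop_succ lines i line rest hdrop
    by_cases hname : PySem.Str.startswith line "NAME: " = true
    · by_cases heq : PySem.Str.strip (PySem.Str.slice line (some 6) none) = changespec_name
      · simp only [pvALoop, pvBStart, hname, heq, and_true, if_pos]
        rw [hdrop']
        exact pvPhase2 lines changespec_name rest (i + 1) i hdrop' (by omega)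
          (by rw [hget]; exact pv_strip_ne_of_name line hname)
          (fun j hj1 hj2 => by omega)
      · simp only [pvALoop, pvBStart, hname, heq, and_false, if_neg, not_false_eq_true]
        exact ih (i + 1) hdrop'
    · simp only [pvALoop, pvBStart, hname, Bool.false_eq_true, false_and, if_false]
      exact ih (i + 1) hdrop'

-- ===== VERDICT (by name: the statement is the Claim_ definition above) =====
theorem find_changespec_end_line_py_spec : Claim_equal_find_changespec_end_line_py := by
  intro lines name _
  unfold Spec_find_changespec_end_line_py find_changespec_end_line_py
    find_changespec_end_line_py_alt
  exact pvPhase1 lines name lines 0 rfl
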